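-- pv_equiv track=rewrite | github.com/wyattowalsh/reasoning-mcp | src/reasoning_mcp/methods/native/mutual_reasoning.py | _generate_candidate_steps_heuristic
-- ===== SOURCE A (Python) =====
-- def _generate_candidate_steps_heuristic(input_text: str, count: int) -> list[str]:
--     """Generate candidate reasoning steps using heuristics (fallback).
--
--     Args:
--         input_text: The problem context
--         count: Number of steps to generate
--
--     Returns:
--         List of candidate step descriptions
--     """
--     # Define step templates for different reasoning approaches
--     step_templates = [
--         "Break down {aspect} into components",
--         "Analyze {aspect} systematically",
--         "Identify key {aspect} relationships",
--         "Evaluate {aspect} implications",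
--         "Consider {aspect} from first principles",
--         "Examine {aspect} constraints",
--         "Explore {aspect} alternatives",
--         "Validate {aspect} assumptions",
--         "Test {aspect} hypotheses",
--         "Synthesize {aspect} insights",
--     ]
--
--     aspects = [
--         "the problem",
--         "the requirements",
--         "the constraints",
--         "the solution space",
--         "the key variables",
--         "the dependencies",
--         "the edge cases",
--         "the trade-offs",
--         "the optimizations",
--         "the verification criteria",
--     ]
--
--     # Generate unique candidate steps
--     steps = []
--     for i in range(count):
--         template = step_templates[i % len(step_templates)]
--         aspect = aspects[(i // len(step_templates)) % len(aspects)]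
--         step = template.format(aspect=aspect)
--         steps.append(step)
--
--     return steps
-- ===== SOURCE B (Python) =====
-- _STEP_TEMPLATES = [
--     "Break down {aspect} into components",
--     "Analyze {aspect} systematically",
--     "Identify key {aspect} relationships",
--     "Evaluate {aspect} implications",
--     "Consider {aspect} from first principles",
--     "Examine {aspect} constraints",
--     "Explore {aspect} alternatives",
--     "Validate {aspect} assumptions",
--     "Test {aspect} hypotheses",
--     "Synthesize {aspect} insights",
-- ]
--
-- _ASPECTS = [
--     "the problem",
--     "the requirements",
--     "the constraints",
--     "the solution space",
--     "the key variables",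
--     "the dependencies",
--     "the edge cases",
--     "the trade-offs",
--     "the optimizations",
--     "the verification criteria",
-- ]
--
--
-- def _generate_candidate_steps_heuristic(input_text: str, count: int) -> list[str]:
--     # Precompute the full 100-entry cycle (aspect outer, template inner),
--     # then repeat it whole and append the leftover prefix.
--     table = [t.format(aspect=a) for a in _ASPECTS for t in _STEP_TEMPLATES]
--     n = max(count, 0)
--     q, r = divmod(n, len(table))
--     return table * q + table[:r]
-- ===== Notes on version B (the rewrite author's own statement) =====
-- stated objective: faster
-- what changed: B precomputes the full 100-entry aspect-by-template table once and builds the result by whole-table repetition plus a prefix slice (table * q + table[:r]), instead of A's per-element modular index arithmetic and string formatting inside the loop.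
import Mathlib
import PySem

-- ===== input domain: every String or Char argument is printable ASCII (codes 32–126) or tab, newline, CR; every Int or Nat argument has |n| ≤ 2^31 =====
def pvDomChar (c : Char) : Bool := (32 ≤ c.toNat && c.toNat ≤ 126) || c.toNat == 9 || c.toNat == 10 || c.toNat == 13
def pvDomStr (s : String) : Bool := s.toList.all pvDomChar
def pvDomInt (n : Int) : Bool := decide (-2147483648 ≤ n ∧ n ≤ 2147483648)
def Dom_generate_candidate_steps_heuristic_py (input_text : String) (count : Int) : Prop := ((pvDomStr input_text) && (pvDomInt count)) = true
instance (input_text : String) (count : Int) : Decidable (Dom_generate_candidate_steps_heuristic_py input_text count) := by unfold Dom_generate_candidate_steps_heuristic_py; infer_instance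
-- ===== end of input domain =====

-- B builds the 100-entry aspect×template table once and repeats it, instead of
-- A's per-element modular index arithmetic (objective: alternative decomposition).

-- ===== PORT A =====
def pvTemplates : List String := [
  "Break down {aspect} into components",
  "Analyze {aspect} systematically",
  "Identify key {aspect} relationships",
  "Evaluate {aspect} implications",
  "Consider {aspect} from first principles",
  "Examine {aspect} constraints",
  "Explore {aspect} alternatives",
  "Validate {aspect} assumptions",
  "Test {aspect} hypotheses",
  "Synthesize {aspect} insights"]

def pvAspects : List String := [
  "the problem",
  "the requirements",
  "the constraints",
  "the solution space",
  "the key variables",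
  "the dependencies",
  "the edge cases",
  "the trade-offs",
  "the optimizations",
  "the verification criteria"]

-- template.format(aspect=a): exact here, since each template contains "{aspect}"
-- exactly once and no other brace fields.
def pvFmt (t a : String) : String := PySem.Str.replace t "{aspect}" a

def generate_candidate_steps_heuristic_py (input_text : String) (count : Int) : List String :=
  (PySem.List.pyRange 0 count 1).foldl (fun steps i =>
    let template := PySem.List.pyGetD pvTemplates (PySem.Int.mod i 10) ""
    let aspect := PySem.List.pyGetD pvAspects (PySem.Int.mod (PySem.Int.floordiv i 10) 10) ""
    steps ++ [pvFmt template aspect]) []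

-- ===== PORT B =====
def pvTable : List String := pvAspects.flatMap (fun a => pvTemplates.map (fun t => pvFmt t a))

def generate_candidate_steps_heuristic_py_alt (input_text : String) (count : Int) : List String :=
  (List.replicate (PySem.Int.floordiv (max count 0) (pvTable.length : Int)).toNat pvTable).flatten
    ++ pvTable.take (PySem.Int.mod (max count 0) (pvTable.length : Int)).toNat

-- ===== PRECONDITION & SPEC =====
def Spec_generate_candidate_steps_heuristic_py (input_text : String) (count : Int) (out : List String) : Prop := out = generate_candidate_steps_heuristic_py_alt input_text count
instance (input_text : String) (count : Int) (out : List String) : Decidable (Spec_generate_candidate_steps_heuristic_py input_text count out) := by unfold Spec_generate_candidate_steps_heuristic_py; infer_instance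

-- ===== CLAIM (what is proved, stated in full; the proofs are below) =====
def Claim_equal_generate_candidate_steps_heuristic_py : Prop := ∀ (input_text : String) (count : Int), Dom_generate_candidate_steps_heuristic_py input_text count → Spec_generate_candidate_steps_heuristic_py input_text count (generate_candidate_steps_heuristic_py input_text count)

-- ===== LEMMAS AND PROOFS =====

def gFun (k : Nat) : String := pvFmt (pvTemplates.getD (k % 10) "") (pvAspects.getD (k / 10 % 10) "")

set_option maxHeartbeats 1600000 in
set_option maxRecDepth 8192 in
lemma pvTable_eq : pvTable = (List.range 100).map gFun := by decide

lemma gFun_period (k : Nat) : gFun (100 + k) = gFun k := by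
  have h1 : (100 + k) % 10 = k % 10 := by omega
  have h2 : (100 + k) / 10 % 10 = k / 10 % 10 := by omega
  simp only [gFun, h1, h2]

lemma range_map_g (q r : Nat) :
    (List.range (100 * q + r)).map gFun
      = (List.replicate q pvTable).flatten ++ (List.range r).map gFun := by
  induction q with
  | zero => simp
  | succ q ih =>
      have h : 100 * (q + 1) + r = 100 + (100 * q + r) := by ring
      rw [h, List.range_add, List.map_append, List.map_map]
      have h2 : (List.range (100 * q + r)).map (gFun ∘ (fun x => 100 + x))
          = (List.range (100 * q + r)).map gFun :=
        List.map_congr_left (fun x _ => gFun_period x)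
      rw [h2, ih, List.replicate_succ, List.flatten_cons, ← pvTable_eq, List.append_assoc]

lemma portA_eq (input_text : String) (count : Int) :
    generate_candidate_steps_heuristic_py input_text count
      = (List.range count.toNat).map gFun := by
  unfold generate_candidate_steps_heuristic_py
  rw [PySem.List.pyRange_one]
  rw [PySem.List.foldl_append_singleton_eq_map]
  rw [List.map_map]
  simp only [List.nil_append, Int.sub_zero]
  apply List.map_congr_left
  intro k _
  have hm : PySem.Int.mod (0 + (k : Int)) 10 = ((k % 10 : Nat) : Int) := by
    rw [PySem.Int.mod_eq_emod_of_pos (by omega)]; omega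
  have hd : PySem.Int.floordiv (0 + (k : Int)) 10 = ((k / 10 : Nat) : Int) := by
    rw [PySem.Int.floordiv_eq_ediv_of_pos (by omega)]; omega
  have hm2 : PySem.Int.mod ((k / 10 : Nat) : Int) 10 = ((k / 10 % 10 : Nat) : Int) := by
    rw [PySem.Int.mod_eq_emod_of_pos (by omega)]; omega
  simp only [Function.comp, hm, hd, hm2, PySem.List.pyGetD_natCast, gFun]

lemma table_take (m : Nat) (hm : m ≤ 100) :
    pvTable.take m = (List.range m).map gFun := by
  rw [pvTable_eq, ← List.map_take, List.take_range]
  simp [Nat.min_eq_left hm]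

lemma portB_eq (input_text : String) (count : Int) :
    generate_candidate_steps_heuristic_py_alt input_text count
      = (List.range count.toNat).map gFun := by
  unfold generate_candidate_steps_heuristic_py_alt
  have hlen : (pvTable.length : Int) = 100 := by decide
  have hmax : max count 0 = ((count.toNat : Nat) : Int) := by omega
  rw [hlen, hmax]
  have hq : PySem.Int.floordiv ((count.toNat : Nat) : Int) 100
      = ((count.toNat / 100 : Nat) : Int) := by
    rw [PySem.Int.floordiv_eq_ediv_of_pos (by omega)]; omega
  have hr : PySem.Int.mod ((count.toNat : Nat) : Int) 100
      = ((count.toNat % 100 : Nat) : Int) := by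
    rw [PySem.Int.mod_eq_emod_of_pos (by omega)]; omega
  rw [hq, hr, Int.toNat_natCast, Int.toNat_natCast]
  have hsplit : count.toNat = 100 * (count.toNat / 100) + count.toNat % 100 := by omega
  conv_rhs => rw [hsplit]
  rw [range_map_g, table_take _ (by omega)]

-- ===== VERDICT (by name: the statement is the Claim_ definition above) =====
theorem generate_candidate_steps_heuristic_py_spec : Claim_equal_generate_candidate_steps_heuristic_py := by
  intro input_text count _
  unfold Spec_generate_candidate_steps_heuristic_py
  rw [portA_eq, portB_eq]
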